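-- pv_equiv track=rewrite | github.com/valenb02/primer-repo | jugando.py | cantidad_de_pizzas
-- ===== SOURCE A (Python) =====
-- def cantidad_de_pizzas(comensales: int, min_cant_porc: int) -> int:
--     cant_porc_necesito : int = comensales * min_cant_porc
--     cant_porc_q_tengo : int = 8
--     cant_pizzas_necesarias : int = 1
--     while cant_porc_necesito > cant_porc_q_tengo:
--         cant_pizzas_necesarias += 1
--         cant_porc_q_tengo += 8
--     return cant_pizzas_necesarias
-- ===== SOURCE B (Python) =====
-- def cantidad_de_pizzas(comensales: int, min_cant_porc: int) -> int:
--     # closed-form ceiling division: at least one pizza, each pizza has 8 slices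
--     return max(1, -(-(comensales * min_cant_porc) // 8))
-- ===== Notes on version B (the rewrite author's own statement) =====
-- stated objective: faster
-- what changed: replaced the slice-counting while loop with a closed-form ceiling division max(1, ceil(comensales*min_cant_porc/8))
import Mathlib
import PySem

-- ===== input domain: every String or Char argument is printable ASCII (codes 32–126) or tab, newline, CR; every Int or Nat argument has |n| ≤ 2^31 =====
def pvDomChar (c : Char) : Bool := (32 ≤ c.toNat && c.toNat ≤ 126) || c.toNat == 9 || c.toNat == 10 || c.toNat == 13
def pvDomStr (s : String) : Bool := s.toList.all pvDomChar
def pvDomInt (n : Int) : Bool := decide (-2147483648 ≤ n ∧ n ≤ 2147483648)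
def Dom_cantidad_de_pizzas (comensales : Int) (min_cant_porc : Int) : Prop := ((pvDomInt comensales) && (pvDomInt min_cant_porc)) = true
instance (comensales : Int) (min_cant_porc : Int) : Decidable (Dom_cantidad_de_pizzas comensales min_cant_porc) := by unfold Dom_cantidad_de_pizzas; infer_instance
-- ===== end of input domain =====

-- B replaces A's slice-counting while loop with a closed-form ceiling division (faster: O(1) vs O(product)).


-- ===== PORT A =====
-- the while loop: while necesito > tengo: pizzas += 1; tengo += 8
def pizzasLoop (necesito tengo pizzas : Int) : Int :=
  if necesito > tengo then pizzasLoop necesito (tengo + 8) (pizzas + 1) else pizzas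
termination_by (necesito - tengo).toNat
decreasing_by omega

def cantidad_de_pizzas (comensales : Int) (min_cant_porc : Int) : Int :=
  pizzasLoop (comensales * min_cant_porc) 8 1

-- ===== PORT B =====
def cantidad_de_pizzas_alt (comensales : Int) (min_cant_porc : Int) : Int :=
  max 1 (-(PySem.Int.floordiv (-(comensales * min_cant_porc)) 8))

-- ===== PRECONDITION & SPEC =====
def Spec_cantidad_de_pizzas (comensales : Int) (min_cant_porc : Int) (out : Int) : Prop := out = cantidad_de_pizzas_alt comensales min_cant_porc
instance (comensales : Int) (min_cant_porc : Int) (out : Int) : Decidable (Spec_cantidad_de_pizzas comensales min_cant_porc out) := by unfold Spec_cantidad_de_pizzas; infer_instance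

-- ===== CLAIM (what is proved, stated in full; the proofs are below) =====
def Claim_equal_cantidad_de_pizzas : Prop := ∀ (comensales : Int) (min_cant_porc : Int), Dom_cantidad_de_pizzas comensales min_cant_porc → Spec_cantidad_de_pizzas comensales min_cant_porc (cantidad_de_pizzas comensales min_cant_porc)

-- ===== LEMMAS AND PROOFS =====
-- ceil(n/8) as B computes it
theorem pizzasLoop_eq (necesito tengo pizzas : Int) (h : tengo = 8 * pizzas) :
    pizzasLoop necesito tengo pizzas = max pizzas (-(Int.fdiv (-necesito) 8)) := by
  have hmod := Int.mul_fdiv_add_fmod (-necesito) 8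
  have hnn : 0 ≤ Int.fmod (-necesito) 8 := Int.fmod_nonneg_of_pos _ (by norm_num)
  have hlt : Int.fmod (-necesito) 8 < 8 := Int.fmod_lt_of_pos _ (by norm_num)
  rw [pizzasLoop]
  split_ifs with hgt
  · rw [pizzasLoop_eq necesito (tengo + 8) (pizzas + 1) (by omega)]
    omega
  · omega
termination_by (necesito - tengo).toNat
decreasing_by omega

-- ===== VERDICT (by name: the statement is the Claim_ definition above) =====
theorem cantidad_de_pizzas_spec : Claim_equal_cantidad_de_pizzas := by
  intro c m _
  unfold Spec_cantidad_de_pizzas cantidad_de_pizzas cantidad_de_pizzas_alt PySem.Int.floordiv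
  rw [pizzasLoop_eq (c * m) 8 1 (by norm_num)]
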